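-- pv_equiv track=rewrite | github.com/SandersNeo/AISecurity | src/brain/engines/synced/multi_agent_cascade_detector.py | _check_privilege_escalation
-- ===== SOURCE A (Python) =====
-- from typing import Any, Dict, List, Optional
--
-- def _check_privilege_escalation(trace: List[Dict]) -> bool:
--     """Check for expanding permissions through chain."""
--     prev_perms = set()
--
--     for step in trace:
--         perms = set(step.get("permissions", []))
--         if not perms:
--             continue
--
--         # If new permissions appear that weren't in previous
--         if prev_perms and perms - prev_perms:
--             return True
--
--         prev_perms = perms
--
--     return False
-- ===== SOURCE B (Python) =====
-- from typing import Any, Dict, List, Optional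
--
-- def _check_privilege_escalation(trace: List[Dict]) -> bool:
--     """Check for expanding permissions through chain."""
--     sets = [s for step in trace if (s := set(step.get("permissions", [])))]
--     universe = {p for s in sets for p in s}
--     return any(
--         p in sets[i] and p not in sets[i - 1]
--         for p in universe
--         for i in range(1, len(sets))
--     )
-- ===== Notes on version B (the rewrite author's own statement) =====
-- stated objective: alternative
-- what changed: Replaced A's streaming accumulator with early return by a per-permission scan: materialize the non-empty permission sets, build the universe of all permissions, and report escalation iff some permission is held at a position but not at the preceding one; no set difference is computed.
import Mathlib
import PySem

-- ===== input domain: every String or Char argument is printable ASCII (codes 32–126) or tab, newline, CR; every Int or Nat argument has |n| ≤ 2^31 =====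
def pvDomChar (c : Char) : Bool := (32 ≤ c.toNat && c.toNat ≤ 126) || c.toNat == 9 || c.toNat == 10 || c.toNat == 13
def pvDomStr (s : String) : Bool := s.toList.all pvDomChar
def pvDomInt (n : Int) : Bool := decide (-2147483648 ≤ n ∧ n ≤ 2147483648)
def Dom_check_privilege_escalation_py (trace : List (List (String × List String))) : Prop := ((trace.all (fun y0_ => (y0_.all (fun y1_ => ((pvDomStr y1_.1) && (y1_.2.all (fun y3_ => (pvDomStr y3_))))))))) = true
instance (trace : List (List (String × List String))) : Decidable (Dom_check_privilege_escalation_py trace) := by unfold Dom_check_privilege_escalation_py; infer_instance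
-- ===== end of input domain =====

-- B replaces A's streaming accumulator loop (with early return) by a per-permission
-- scan: it materializes the non-empty permission sets, forms the universe of all
-- permissions, and asks whether some permission is held at a step but not at the
-- preceding one; objective: alternative algorithm (no set difference, no accumulator).

-- ===== PORT A =====
-- step.get("permissions", []) on a dict (assoc list with unique keys) is ported by hand
-- as first-match lookup: (step.lookup "permissions").getD [] — exact for Python dicts.
-- A's loop: prev_perms starts empty; skip empty perms; return True when prev nonempty
-- and perms - prev_perms nonempty; otherwise prev_perms = perms.
def pvALoop (trace : List (List (String × List String))) (prev : PySem.Set String) : Bool :=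
  match trace with
  | [] => false
  | step :: rest =>
    let perms : PySem.Set String := PySem.Set.ofList ((step.lookup "permissions").getD [])
    if perms = [] then pvALoop rest prev
    else if prev ≠ [] ∧ PySem.Set.diff perms prev ≠ [] then true
    else pvALoop rest perms

def check_privilege_escalation_py (trace : List (List (String × List String))) : Bool :=
  pvALoop trace PySem.Set.empty

-- ===== PORT B =====
-- sets = [s for step in trace if (s := set(step.get("permissions", [])))]
def pvSetsOf (trace : List (List (String × List String))) : List (PySem.Set String) :=
  (trace.map (fun step => PySem.Set.ofList ((step.lookup "permissions").getD []))).filter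
    (fun s => !s.isEmpty)

-- universe = {p for s in sets for p in s}; then
-- any(p in sets[i] and p not in sets[i-1] for p in universe for i in range(1, len(sets)))
-- (range(1, len(sets)) is List.range' 1 (len-1); sets[i]/sets[i-1] are in range, ported as getD)
def check_privilege_escalation_py_alt (trace : List (List (String × List String))) : Bool :=
  let sets := pvSetsOf trace
  let univ : PySem.Set String := PySem.Set.ofList (sets.flatMap (fun s => s))
  univ.any (fun p =>
    (List.range' 1 (sets.length - 1)).any (fun i =>
      (sets.getD i []).contains p && !((sets.getD (i - 1) []).contains p)))

-- ===== PRECONDITION & SPEC =====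
def Spec_check_privilege_escalation_py (trace : List (List (String × List String))) (out : Bool) : Prop := out = check_privilege_escalation_py_alt trace
instance (trace : List (List (String × List String))) (out : Bool) : Decidable (Spec_check_privilege_escalation_py trace out) := by unfold Spec_check_privilege_escalation_py; infer_instance

-- ===== CLAIM (what is proved, stated in full; the proofs are below) =====
def Claim_equal_check_privilege_escalation_py : Prop := ∀ (trace : List (List (String × List String))), Dom_check_privilege_escalation_py trace → Spec_check_privilege_escalation_py trace (check_privilege_escalation_py trace)

-- ===== LEMMAS AND PROOFS =====

-- the common exists-characterisation: some permission is at position j+1 but not at j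
def pvEsc (sets : List (PySem.Set String)) : Prop :=
  ∃ j, j + 1 < sets.length ∧ ∃ p, p ∈ sets.getD (j + 1) [] ∧ p ∉ sets.getD j []

-- A's pairwise view (proved equal to A's loop in the lemmas below)
def pvPairs (sets : List (PySem.Set String)) : Bool :=
  match sets with
  | a :: b :: l => !(PySem.Set.diff b a).isEmpty || pvPairs (b :: l)
  | _ => false

theorem pvSetsOf_cons (step : List (String × List String)) (rest : List (List (String × List String))) :
    pvSetsOf (step :: rest) =
      (let perms := PySem.Set.ofList ((step.lookup "permissions").getD [])
       if perms = [] then pvSetsOf rest else perms :: pvSetsOf rest) := by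
  simp only [pvSetsOf, List.map_cons, List.filter_cons]
  by_cases h : PySem.Set.ofList ((step.lookup "permissions").getD []) = ([] : List String)
  · simp [h]
  · simp [h]

-- A's loop with a nonempty accumulator equals the pairwise scan with it prepended
theorem pvALoop_ne (trace : List (List (String × List String))) :
    ∀ prev : PySem.Set String, prev ≠ [] →
      pvALoop trace prev = pvPairs (prev :: pvSetsOf trace) := by
  induction trace with
  | nil => intro prev _; simp [pvALoop, pvSetsOf, pvPairs]
  | cons step rest ih =>
    intro prev hprev
    rw [pvSetsOf_cons]
    simp only [pvALoop]
    by_cases h : PySem.Set.ofList ((step.lookup "permissions").getD []) = ([] : List String)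
    · simp only [h, if_pos]
      exact ih prev hprev
    · simp only [h, if_false]
      by_cases hd : PySem.Set.diff (PySem.Set.ofList ((step.lookup "permissions").getD [])) prev = []
      · have : ¬ (prev ≠ [] ∧ PySem.Set.diff (PySem.Set.ofList ((step.lookup "permissions").getD [])) prev ≠ []) := by
          intro ⟨_, h2⟩; exact h2 hd
        rw [if_neg this, ih _ h]
        simp [pvPairs, hd]
      · rw [if_pos ⟨hprev, hd⟩]
        simp [pvPairs, hd]

-- A's loop with the empty accumulator equals the pairwise scan over the sets
theorem pvALoop_empty (trace : List (List (String × List String))) :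
    pvALoop trace ([] : PySem.Set String) = pvPairs (pvSetsOf trace) := by
  induction trace with
  | nil => simp [pvALoop, pvSetsOf, pvPairs]
  | cons step rest ih =>
    rw [pvSetsOf_cons]
    simp only [pvALoop]
    by_cases h : PySem.Set.ofList ((step.lookup "permissions").getD []) = ([] : List String)
    · simp only [h, if_pos]; exact ih
    · simp only [h, ne_eq, not_true_eq_false, false_and, if_false]
      exact pvALoop_ne rest _ h

-- nonempty diff ↔ an element in the one and not the other
theorem pvDiff_ne (a b : PySem.Set String) :
    (!(PySem.Set.diff b a).isEmpty) = true ↔ ∃ p, p ∈ b ∧ p ∉ a := by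
  rw [Bool.not_eq_eq_eq_not, Bool.not_true, List.isEmpty_eq_false_iff]
  constructor
  · intro h
    obtain ⟨p, t, ht⟩ := List.exists_cons_of_ne_nil h
    have hp : p ∈ PySem.Set.diff b a := ht ▸ List.mem_cons_self
    exact ⟨p, (PySem.Set.mem_diff _ _ _).mp hp⟩
  · rintro ⟨p, hb, ha⟩
    exact List.ne_nil_of_mem ((PySem.Set.mem_diff _ _ _).mpr ⟨hb, ha⟩)

-- the pairwise scan decides pvEsc
theorem pvPairs_iff (sets : List (PySem.Set String)) : pvPairs sets = true ↔ pvEsc sets := by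
  induction sets with
  | nil => simp [pvPairs, pvEsc]
  | cons a l ih =>
    cases l with
    | nil =>
      simp [pvPairs, pvEsc]
    | cons b l' =>
      simp only [pvPairs, Bool.or_eq_true, ih, pvEsc]
      constructor
      · rintro (h | ⟨j, hj, p, hp⟩)
        · obtain ⟨p, hp⟩ := (pvDiff_ne a b).mp h
          exact ⟨0, by simp, p, by simpa using hp⟩
        · exact ⟨j + 1, by simpa using hj, p, by simpa using hp⟩
      · rintro ⟨j, hj, p, hp⟩
        cases j with
        | zero => exact Or.inl ((pvDiff_ne a b).mpr ⟨p, by simpa using hp⟩)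
        | succ j' => exact Or.inr ⟨j', by simpa using hj, p, by simpa using hp⟩

-- B's per-permission scan also decides pvEsc
theorem pvAlt_iff (sets : List (PySem.Set String)) :
    ((PySem.Set.ofList (sets.flatMap (fun s => s))).any (fun p =>
      (List.range' 1 (sets.length - 1)).any (fun i =>
        (sets.getD i []).contains p && !((sets.getD (i - 1) []).contains p))) = true)
      ↔ pvEsc sets := by
  simp only [List.any_eq_true, PySem.Set.mem_ofList, List.mem_flatMap, List.mem_range'_1,
    Bool.and_eq_true, Bool.not_eq_eq_eq_not, Bool.not_true, PySem.Set.contains_iff,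
    ← Bool.not_eq_true, pvEsc, List.getD_eq_getElem?_getD]
  constructor
  · rintro ⟨p, -, i, ⟨h1, h2⟩, hin, hout⟩
    refine ⟨i - 1, by omega, p, ?_, hout⟩
    have hi : i - 1 + 1 = i := by omega
    rw [hi]; exact hin
  · rintro ⟨j, hj, p, hin, hout⟩
    have hmem : sets[j + 1]?.getD [] ∈ sets := by
      rw [List.getElem?_eq_getElem hj]; exact List.getElem_mem _
    exact ⟨p, ⟨_, hmem, hin⟩, j + 1, ⟨by omega, by omega⟩, hin, by simpa using hout⟩

-- ===== VERDICT (by name: the statement is the Claim_ definition above) =====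
theorem check_privilege_escalation_py_spec : Claim_equal_check_privilege_escalation_py := by
  intro trace _
  unfold Spec_check_privilege_escalation_py check_privilege_escalation_py
    check_privilege_escalation_py_alt
  rw [show (PySem.Set.empty : PySem.Set String) = [] from rfl, pvALoop_empty]
  exact Bool.coe_iff_coe.mp
    ((pvPairs_iff (pvSetsOf trace)).trans (pvAlt_iff (pvSetsOf trace)).symm)
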